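-- pv_equiv track=rewrite | github.com/brightgerm-max/CKD | competitor_scanner.py | compare_ingredients
-- ===== SOURCE A (Python) =====
-- def compare_ingredients(ckd_ingredients: list[str], competitor_ingredients: list[str]) -> dict:
--     """
--     자사 vs 경쟁사 성분 비교.
--     반환: {
--         "ckd_only": 자사만 보유 성분,
--         "competitor_only": 경쟁사만 보유 성분,
--         "common": 공통 성분,
--     }
--     """
--     ckd_set = set(i.lower() for i in ckd_ingredients)
--     comp_set = set(i.lower() for i in competitor_ingredients)
--
--     return {
--         "ckd_only": sorted(ckd_set - comp_set),
--         "competitor_only": sorted(comp_set - ckd_set),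
--         "common": sorted(ckd_set & comp_set),
--     }
-- ===== SOURCE B (Python) =====
-- def compare_ingredients(ckd_ingredients: list[str], competitor_ingredients: list[str]) -> dict:
--     # One dict indexing each lowercased ingredient by which side(s) it appears on,
--     # then a single classification pass over the dict items.
--     flags = {}
--     for i in ckd_ingredients:
--         k = i.lower()
--         old = flags.get(k, (False, False))
--         flags[k] = (True, old[1])
--     for i in competitor_ingredients:
--         k = i.lower()
--         old = flags.get(k, (False, False))
--         flags[k] = (old[0], True)
--     ckd_only, competitor_only, common = [], [], []
--     for k, (a, b) in flags.items():
--         if a and b: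
--             common.append(k)
--         elif a:
--             ckd_only.append(k)
--         else:
--             competitor_only.append(k)
--     return {
--         "ckd_only": sorted(ckd_only),
--         "competitor_only": sorted(competitor_only),
--         "common": sorted(common),
--     }
-- ===== Notes on version B (the rewrite author's own statement) =====
-- stated objective: alternative
-- what changed: Replaces A's two sets and three set-algebra operations (difference, difference, intersection) by one dict mapping each lowercased ingredient to a pair of source flags, built in two passes, followed by a single classification pass over the dict items into the three buckets, each then sorted.
import Mathlib
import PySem

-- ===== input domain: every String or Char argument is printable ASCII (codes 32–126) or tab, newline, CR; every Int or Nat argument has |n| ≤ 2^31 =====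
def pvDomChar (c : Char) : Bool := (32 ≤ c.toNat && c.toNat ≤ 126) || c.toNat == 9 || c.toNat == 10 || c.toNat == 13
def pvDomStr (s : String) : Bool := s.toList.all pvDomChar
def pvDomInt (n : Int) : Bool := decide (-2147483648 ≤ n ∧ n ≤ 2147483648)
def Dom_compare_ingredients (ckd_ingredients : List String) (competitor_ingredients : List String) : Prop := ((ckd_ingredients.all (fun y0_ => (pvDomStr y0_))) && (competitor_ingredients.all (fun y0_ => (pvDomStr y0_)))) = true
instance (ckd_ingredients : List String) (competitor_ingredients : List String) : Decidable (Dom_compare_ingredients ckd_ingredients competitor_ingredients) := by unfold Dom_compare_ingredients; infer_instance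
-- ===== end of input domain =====

-- B replaces A's three set-algebra operations by one source-flag dict built in two passes
-- and a single classification pass over its items (objective: alternative decomposition, same cost).

-- ===== PORT A =====
def compare_ingredients (ckd_ingredients : List String) (competitor_ingredients : List String) : List (String × List String) :=
  let ckd_set := PySem.Set.ofList (ckd_ingredients.map PySem.Str.lower)
  let comp_set := PySem.Set.ofList (competitor_ingredients.map PySem.Str.lower)
  [("ckd_only", PySem.List.sorted (PySem.Set.diff ckd_set comp_set) (fun x => x) false),
   ("competitor_only", PySem.List.sorted (PySem.Set.diff comp_set ckd_set) (fun x => x) false),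
   ("common", PySem.List.sorted (PySem.Set.inter ckd_set comp_set) (fun x => x) false)]

-- ===== PORT B =====
-- one step of B's classification loop (append k to the bucket its flag pair selects)
def ciClassifyStep (acc : List String × List String × List String) (p : String × (Bool × Bool)) :
    List String × List String × List String :=
  if p.2.1 && p.2.2 then (acc.1, acc.2.1, acc.2.2 ++ [p.1])
  else if p.2.1 then (acc.1 ++ [p.1], acc.2.1, acc.2.2)
  else (acc.1, acc.2.1 ++ [p.1], acc.2.2)

def compare_ingredients_alt (ckd_ingredients : List String) (competitor_ingredients : List String) : List (String × List String) :=
  let d1 := ckd_ingredients.foldl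
    (fun d i => d.insert (PySem.Str.lower i) (true, (d.getD (PySem.Str.lower i) (false, false)).2))
    PySem.Dict.empty
  let d2 := competitor_ingredients.foldl
    (fun d i => d.insert (PySem.Str.lower i) ((d.getD (PySem.Str.lower i) (false, false)).1, true))
    d1
  let t := d2.items.foldl ciClassifyStep ([], [], [])
  [("ckd_only", PySem.List.sorted t.1 (fun x => x) false),
   ("competitor_only", PySem.List.sorted t.2.1 (fun x => x) false),
   ("common", PySem.List.sorted t.2.2 (fun x => x) false)]

-- ===== PRECONDITION & SPEC =====
def Spec_compare_ingredients (ckd_ingredients : List String) (competitor_ingredients : List String) (out : List (String × List String)) : Prop := out = compare_ingredients_alt ckd_ingredients competitor_ingredients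
instance (ckd_ingredients : List String) (competitor_ingredients : List String) (out : List (String × List String)) : Decidable (Spec_compare_ingredients ckd_ingredients competitor_ingredients out) := by unfold Spec_compare_ingredients; infer_instance

-- ===== CLAIM (what is proved, stated in full; the proofs are below) =====
def Claim_equal_compare_ingredients : Prop := ∀ (ckd_ingredients : List String) (competitor_ingredients : List String), Dom_compare_ingredients ckd_ingredients competitor_ingredients → Spec_compare_ingredients ckd_ingredients competitor_ingredients (compare_ingredients ckd_ingredients competitor_ingredients)

-- ===== LEMMAS AND PROOFS =====

-- phase-1 loop: flag.1 becomes true on lowercased members, flag.2 untouched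
theorem ci_getD_phase1 (l : List String) (d : PySem.Dict String (Bool × Bool)) (k : String) :
    ((l.foldl (fun d i => d.insert (PySem.Str.lower i) (true, (d.getD (PySem.Str.lower i) (false, false)).2)) d).getD k (false, false)) =
      ((decide (k ∈ l.map PySem.Str.lower) || (d.getD k (false, false)).1), (d.getD k (false, false)).2) := by
  induction l generalizing d with
  | nil => simp
  | cons x xs ih =>
    simp only [List.foldl_cons, ih, PySem.Dict.getD_insert, List.map_cons, List.mem_cons]
    by_cases h : k = PySem.Str.lower x <;> simp [h]

-- phase-2 loop: flag.2 becomes true on lowercased members, flag.1 untouched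
theorem ci_getD_phase2 (l : List String) (d : PySem.Dict String (Bool × Bool)) (k : String) :
    ((l.foldl (fun d i => d.insert (PySem.Str.lower i) ((d.getD (PySem.Str.lower i) (false, false)).1, true)) d).getD k (false, false)) =
      ((d.getD k (false, false)).1, (decide (k ∈ l.map PySem.Str.lower) || (d.getD k (false, false)).2)) := by
  induction l generalizing d with
  | nil => simp
  | cons x xs ih =>
    simp only [List.foldl_cons, ih, PySem.Dict.getD_insert, List.map_cons, List.mem_cons]
    by_cases h : k = PySem.Str.lower x <;> simp [h]

-- the classification fold is three filters
theorem ci_classify_eq (l : List (String × (Bool × Bool))) (acc : List String × List String × List String) :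
    l.foldl ciClassifyStep acc =
      (acc.1 ++ (l.filter (fun p => p.2.1 && !p.2.2)).map (·.1),
       acc.2.1 ++ (l.filter (fun p => !p.2.1)).map (·.1),
       acc.2.2 ++ (l.filter (fun p => p.2.1 && p.2.2)).map (·.1)) := by
  induction l generalizing acc with
  | nil => simp
  | cons x xs ih =>
    simp only [List.foldl_cons, ih, ciClassifyStep]
    rcases x with ⟨k, a, b⟩
    cases a <;> cases b <;> simp

theorem ci_buckets (ckd_ingredients : List String) (competitor_ingredients : List String) :
    ((((competitor_ingredients.foldl
        (fun d i => d.insert (PySem.Str.lower i) ((d.getD (PySem.Str.lower i) (false, false)).1, true))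
        (ckd_ingredients.foldl
          (fun d i => d.insert (PySem.Str.lower i) (true, (d.getD (PySem.Str.lower i) (false, false)).2))
          PySem.Dict.empty)).items.foldl ciClassifyStep ([], [], []))) =
      (PySem.Set.diff (PySem.Set.ofList (ckd_ingredients.map PySem.Str.lower)) (PySem.Set.ofList (competitor_ingredients.map PySem.Str.lower)),
       PySem.Set.diff (PySem.Set.ofList (competitor_ingredients.map PySem.Str.lower)) (PySem.Set.ofList (ckd_ingredients.map PySem.Str.lower)),
       PySem.Set.inter (PySem.Set.ofList (ckd_ingredients.map PySem.Str.lower)) (PySem.Set.ofList (competitor_ingredients.map PySem.Str.lower)))) := by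
  set cl := ckd_ingredients.map PySem.Str.lower with hcl
  set pl := competitor_ingredients.map PySem.Str.lower with hpl
  set C := PySem.Set.ofList cl with hC
  set P := PySem.Set.ofList pl with hP
  set d2 := (competitor_ingredients.foldl
        (fun d i => d.insert (PySem.Str.lower i) ((d.getD (PySem.Str.lower i) (false, false)).1, true))
        (ckd_ingredients.foldl
          (fun d i => d.insert (PySem.Str.lower i) (true, (d.getD (PySem.Str.lower i) (false, false)).2))
          PySem.Dict.empty)) with hd2
  have hkeys : d2.keys = PySem.Set.update C pl := by
    rw [hd2, PySem.Dict.keys_foldl_insert_key, PySem.Dict.keys_foldl_insert_key,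
        PySem.Dict.keys_empty, PySem.Set.update_nil_left]
  have hnd : d2.keys.Nodup := by
    rw [hd2]
    exact PySem.Dict.nodup_keys_foldl_insert_key _ _ _ _
      (PySem.Dict.nodup_keys_foldl_insert_key _ _ _ _ PySem.Dict.nodup_keys_empty)
  have hget : ∀ k, d2.getD k (false, false) = (decide (k ∈ cl), decide (k ∈ pl)) := by
    intro k
    rw [hd2, ci_getD_phase2, ci_getD_phase1]
    simp [PySem.Dict.getD_empty, hcl, hpl]
  have hitems : d2.items = d2.keys.map (fun k => (k, (decide (k ∈ cl), decide (k ∈ pl)))) := by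
    rw [PySem.Dict.items_eq_map_keys d2 hnd (false, false)]
    exact List.map_congr_left (fun k _ => by rw [hget k])
  rw [hitems, ci_classify_eq, hkeys, PySem.Set.update_eq_append_filter]
  simp only [List.nil_append, List.filter_map, List.map_map, Function.comp_def, List.map_id',
    List.filter_append]
  have hCmem : ∀ k ∈ C, k ∈ cl := fun k hk => (PySem.Set.mem_ofList _ _).1 (hC ▸ hk)
  have hPmem : ∀ k ∈ P, k ∈ pl := fun k hk => (PySem.Set.mem_ofList _ _).1 (hP ▸ hk)
  have memC : ∀ k, (C.contains k) = decide (k ∈ cl) := by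
    intro k
    simp [PySem.Set.contains, hC, PySem.Set.mem_ofList]
  have memP : ∀ k, (P.contains k) = decide (k ∈ pl) := by
    intro k
    simp [PySem.Set.contains, hP, PySem.Set.mem_ofList]
  have hPf : ∀ k ∈ P.filter (fun y => !C.contains y), k ∈ pl ∧ ¬ k ∈ cl := by
    intro k hk
    have h1 := List.mem_filter.1 hk
    refine ⟨hPmem k h1.1, ?_⟩
    have := h1.2
    rw [memC] at this
    simpa using this
  have hA1 : C.filter (fun x => decide (x ∈ cl) && !decide (x ∈ pl)) = PySem.Set.diff C P := by
    simp only [PySem.Set.diff]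
    refine List.filter_congr ?_
    intro k hk
    simp [hCmem k hk, hP, PySem.Set.mem_ofList]
  have hA2 : (P.filter (fun y => !C.contains y)).filter (fun x => decide (x ∈ cl) && !decide (x ∈ pl)) = [] := by
    refine List.filter_eq_nil_iff.2 ?_
    intro k hk
    have h := hPf k hk
    simp [h.1, h.2]
  have hB1 : C.filter (fun x => !decide (x ∈ cl)) = [] := by
    refine List.filter_eq_nil_iff.2 ?_
    intro k hk
    simp [hCmem k hk]
  have hB2 : (P.filter (fun y => !C.contains y)).filter (fun x => !decide (x ∈ cl)) = P.filter (fun y => !C.contains y) := by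
    refine List.filter_eq_self.2 ?_
    intro k hk
    simp [(hPf k hk).2]
  have hB3 : P.filter (fun y => !C.contains y) = PySem.Set.diff P C := by
    simp [PySem.Set.diff]
  have hC1 : C.filter (fun x => decide (x ∈ cl) && decide (x ∈ pl)) = PySem.Set.inter C P := by
    simp only [PySem.Set.inter]
    refine List.filter_congr ?_
    intro k hk
    simp [hCmem k hk, hP, PySem.Set.mem_ofList]
  have hC2 : (P.filter (fun y => !C.contains y)).filter (fun x => decide (x ∈ cl) && decide (x ∈ pl)) = [] := by
    refine List.filter_eq_nil_iff.2 ?_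
    intro k hk
    simp [(hPf k hk).2]
  rw [hA1, hA2, hB1, hB2, hC1, hC2, hB3]
  simp

-- ===== VERDICT (by name: the statement is the Claim_ definition above) =====
theorem compare_ingredients_spec : Claim_equal_compare_ingredients := by
  intro ckd comp _
  simp only [Spec_compare_ingredients, compare_ingredients, compare_ingredients_alt,
    ci_buckets ckd comp]
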